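-- pv_equiv track=rewrite | github.com/nikhileswar05/biological-sequence-labeling | final1.py | TMRelabel
-- ===== SOURCE A (Python) =====
-- def TMRelabel(lbl):
--     re_lbl = lbl[:]  # Create a shallow copy of the list of strings
--
--     for i in range(len(lbl)):
--         templbl = lbl[i]
--         m_tag = 0
--         templbl_list = list(templbl)  # Convert string to list of characters for modification
--
--         for j in range(len(templbl)):
--             if templbl[j] == 'o':
--                 m_tag = 1
--             elif templbl[j] == 'i':
--                 m_tag = 2
--             elif templbl[j] == 'M' and m_tag == 1:
--                 templbl_list[j] = 'm'  # Change 'M' to 'm' based on condition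
--
--         # After modifying the characters, reassemble the string and assign it back
--         re_lbl[i] = ''.join(templbl_list)
--
--     return re_lbl
-- ===== SOURCE B (Python) =====
-- def TMRelabel(lbl):
--     def fix(part):
--         k = part.find('o')
--         if k < 0:
--             return part
--         return part[:k] + part[k:].replace('M', 'm')
--     return ['i'.join(fix(p) for p in s.split('i')) for s in lbl]
-- ===== Notes on version B (the rewrite author's own statement) =====
-- stated objective: alternative
-- what changed: Replaces the per-character three-state scan with in-place index mutation by splitting each label on 'i', lowercasing every 'M' from the first 'o' onward within each piece via find/slice/replace, and rejoining with 'i'.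
import Mathlib
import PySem

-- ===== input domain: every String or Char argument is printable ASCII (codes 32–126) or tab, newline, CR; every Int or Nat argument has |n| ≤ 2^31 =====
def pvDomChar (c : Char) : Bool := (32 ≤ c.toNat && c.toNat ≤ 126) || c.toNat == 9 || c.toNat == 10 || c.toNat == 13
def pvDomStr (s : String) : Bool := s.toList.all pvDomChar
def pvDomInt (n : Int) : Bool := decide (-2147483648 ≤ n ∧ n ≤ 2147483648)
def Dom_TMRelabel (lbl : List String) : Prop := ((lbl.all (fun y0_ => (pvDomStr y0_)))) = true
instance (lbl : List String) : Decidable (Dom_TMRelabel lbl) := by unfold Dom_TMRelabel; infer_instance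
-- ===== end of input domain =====

-- B relabels by splitting each label on 'i' and lowercasing 'M' from the first 'o' of each piece,
-- instead of A's per-character three-state scan with in-place index mutation (objective: alternative, same cost).

-- ===== PORT A =====
-- inner loop body: for j in range(len(templbl)) over state (m_tag, templbl_list), reading templbl[j]
def pvInnerStep (templbl : List Char) (st : Int × List Char) (j : Int) : Int × List Char :=
  let c := PySem.List.pyGetD templbl j ' '
  if c = 'o' then (1, st.2)
  else if c = 'i' then (2, st.2)
  else if c = 'M' ∧ st.1 = 1 then (st.1, st.2.set j.toNat 'm')
  else st

def TMRelabel (lbl : List String) : List String :=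
  -- re_lbl = lbl[:]; for i in range(len(lbl)): ... re_lbl[i] = ''.join(templbl_list)
  (PySem.List.pyRange 0 (PySem.List.len lbl) 1).foldl
    (fun re_lbl i =>
      let templbl := (PySem.List.pyGetD lbl i "").toList
      let res := (PySem.List.pyRange 0 (PySem.List.len templbl) 1).foldl
        (pvInnerStep templbl) ((0 : Int), templbl)
      re_lbl.set i.toNat (String.ofList res.2))
    lbl

-- ===== PORT B =====
def pvFix (part : String) : String :=
  let k := PySem.Str.find part "o"
  if k < 0 then part
  else PySem.Str.slice part none (some k) ++
       PySem.Str.replace (PySem.Str.slice part (some k) none) "M" "m"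

def TMRelabel_alt (lbl : List String) : List String :=
  lbl.map (fun s => PySem.Str.join "i" (((PySem.Str.split? s "i").getD []).map pvFix))

-- ===== PRECONDITION & SPEC =====
def Spec_TMRelabel (lbl : List String) (out : List String) : Prop := out = TMRelabel_alt lbl
instance (lbl : List String) (out : List String) : Decidable (Spec_TMRelabel lbl out) := by unfold Spec_TMRelabel; infer_instance

-- ===== CLAIM (what is proved, stated in full; the proofs are below) =====
def Claim_equal_TMRelabel : Prop := ∀ (lbl : List String), Dom_TMRelabel lbl → Spec_TMRelabel lbl (TMRelabel lbl)

-- ===== LEMMAS AND PROOFS =====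

-- the relabelling as a functional state machine (the common reference semantics)
def pvMach : Int → List Char → List Char
  | _, [] => []
  | tag, c :: t =>
    (if c = 'M' ∧ tag = 1 then 'm' else c) ::
      pvMach (if c = 'o' then 1 else if c = 'i' then 2 else tag) t

def pvFtag : Int → List Char → Int
  | tag, [] => tag
  | tag, c :: t => pvFtag (if c = 'o' then 1 else if c = 'i' then 2 else tag) t

def pvR (c : Char) : Char := if c = 'M' then 'm' else c

-- (first piece, remaining pieces) of splitting on 'i'
def pvMsp : List Char → List Char × List (List Char)
  | [] => ([], [])
  | c :: t => if c = 'i' then ([], (pvMsp t).1 :: (pvMsp t).2) else (c :: (pvMsp t).1, (pvMsp t).2)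

def pvFixS : List Char → List Char
  | [] => []
  | c :: t => if c = 'o' then c :: t.map pvR else c :: pvFixS t

-- ---- A side ----

lemma pv_inner_inv : ∀ (cs : List Char) (tag : Int) (pre : List Char),
    (PySem.List.enumerate cs (pre.length : Int)).foldl
      (fun (st : Int × List Char) (jc : Int × Char) =>
        if jc.2 = 'o' then (1, st.2)
        else if jc.2 = 'i' then (2, st.2)
        else if jc.2 = 'M' ∧ st.1 = 1 then (st.1, st.2.set jc.1.toNat 'm')
        else st)
      (tag, pre ++ cs)
    = (pvFtag tag cs, pre ++ pvMach tag cs) := by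
  intro cs
  induction cs with
  | nil =>
    intro tag pre
    simp [PySem.List.enumerate_nil, pvFtag, pvMach]
  | cons c t ih =>
    intro tag pre
    rw [PySem.List.enumerate_cons, List.foldl_cons]
    by_cases ho : c = 'o'
    · subst ho
      have ht := ih 1 (pre ++ ['o'])
      simp only [List.append_assoc, List.singleton_append, List.length_append,
        List.length_cons, List.length_nil] at ht
      push_cast at ht ⊢
      simp [pvMach, pvFtag, ht]
    · by_cases hi : c = 'i'
      · subst hi
        have ht := ih 2 (pre ++ ['i'])
        simp only [List.append_assoc, List.singleton_append, List.length_append,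
          List.length_cons, List.length_nil] at ht
        push_cast at ht ⊢
        simp [pvMach, pvFtag, ht]
      · by_cases hM : c = 'M' ∧ tag = 1
        · obtain ⟨hc, htag⟩ := hM
          subst hc; subst htag
          have ht := ih 1 (pre ++ ['m'])
          simp only [List.append_assoc, List.singleton_append, List.length_append,
            List.length_cons, List.length_nil] at ht
          push_cast at ht ⊢
          simp [pvMach, pvFtag, ht]
        · have ht := ih tag (pre ++ [c])
          simp only [List.append_assoc, List.singleton_append, List.length_append,
            List.length_cons, List.length_nil] at ht
          push_cast at ht ⊢
          simp [pvMach, pvFtag, ho, hi, hM, ht]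

lemma pv_inner_eq (s : List Char) :
    ((PySem.List.pyRange 0 (PySem.List.len s) 1).foldl (pvInnerStep s) ((0 : Int), s)).2
    = pvMach 0 s := by
  have h2 := pv_inner_inv s 0 []
  simp only [List.nil_append, List.length_nil, Nat.cast_zero] at h2
  rw [PySem.List.enumerate_eq_map_pyRange s ' ', List.foldl_map] at h2
  have hstep : (fun (st : Int × List Char) (j : Int) =>
      (fun (st : Int × List Char) (jc : Int × Char) =>
        if jc.2 = 'o' then ((1 : Int), st.2)
        else if jc.2 = 'i' then ((2 : Int), st.2)
        else if jc.2 = 'M' ∧ st.1 = 1 then (st.1, st.2.set jc.1.toNat 'm')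
        else st) st (j, PySem.List.pyGetD s j ' ')) = pvInnerStep s := by
    funext st j
    simp [pvInnerStep]
  rw [hstep] at h2
  rw [h2]

lemma pv_outer_inv (g : String → String) : ∀ (ls pre : List String),
    (PySem.List.enumerate ls (pre.length : Int)).foldl
      (fun r (p : Int × String) => r.set p.1.toNat (g p.2)) (pre ++ ls)
    = pre ++ ls.map g := by
  intro ls
  induction ls with
  | nil =>
    intro pre
    simp [PySem.List.enumerate_nil]
  | cons s t ih =>
    intro pre
    rw [PySem.List.enumerate_cons, List.foldl_cons]
    have ht := ih (pre ++ [g s])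
    simp only [List.append_assoc, List.singleton_append, List.length_append,
      List.length_cons, List.length_nil] at ht
    push_cast at ht ⊢
    simp [ht]

lemma pv_A_eq_map (lbl : List String) :
    TMRelabel lbl = lbl.map (fun s => String.ofList (pvMach 0 s.toList)) := by
  have h := pv_outer_inv (fun s => String.ofList (pvMach 0 s.toList)) lbl []
  simp only [List.nil_append, List.length_nil, Nat.cast_zero] at h
  rw [PySem.List.enumerate_eq_map_pyRange lbl "", List.foldl_map] at h
  unfold TMRelabel
  simp only [pv_inner_eq]
  exact h

-- ---- B side ----

lemma pv_goSplit : ∀ (cs : List Char) (fuel : Nat) (cur : List Char) (acc : List (List Char)),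
    cs.length ≤ fuel →
    PySem.Chars.splitOn.go ['i'] fuel cs cur acc
      = acc.reverse ++ (cur.reverse ++ (pvMsp cs).1) :: (pvMsp cs).2 := by
  intro cs
  induction cs with
  | nil =>
    intro fuel cur acc _
    cases fuel <;> simp [PySem.Chars.splitOn.go, pvMsp]
  | cons c t ih =>
    intro fuel cur acc h
    cases fuel with
    | zero => simp at h
    | succ f =>
      by_cases hc : c = 'i'
      · subst hc
        rw [show PySem.Chars.splitOn.go ['i'] (f+1) ('i'::t) cur acc
            = PySem.Chars.splitOn.go ['i'] f t [] (cur.reverse :: acc) from by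
          simp [PySem.Chars.splitOn.go, List.isPrefixOf]]
        rw [ih f [] (cur.reverse :: acc) (by simpa using Nat.lt_succ_iff.mp (by simpa using h))]
        simp [pvMsp]
      · rw [show PySem.Chars.splitOn.go ['i'] (f+1) (c::t) cur acc
            = PySem.Chars.splitOn.go ['i'] f t (c :: cur) acc from by
          simp [PySem.Chars.splitOn.go, List.isPrefixOf, Ne.symm hc]]
        rw [ih f (c :: cur) acc (by simpa using Nat.lt_succ_iff.mp (by simpa using h))]
        simp [pvMsp, hc]

lemma pv_splitOn_i (cs : List Char) :
    PySem.Chars.splitOn cs ['i'] = (pvMsp cs).1 :: (pvMsp cs).2 := by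
  rw [show PySem.Chars.splitOn cs ['i']
      = PySem.Chars.splitOn.go ['i'] (cs.length + 1) cs [] [] from rfl]
  rw [pv_goSplit cs (cs.length + 1) [] [] (by omega)]
  simp

lemma pv_goRepl : ∀ (cs : List Char) (fuel : Nat) (acc : List Char),
    cs.length ≤ fuel →
    PySem.Chars.replace.go ['M'] ['m'] fuel cs acc = acc.reverse ++ cs.map pvR := by
  intro cs
  induction cs with
  | nil =>
    intro fuel acc _
    cases fuel <;> simp [PySem.Chars.replace.go]
  | cons c t ih =>
    intro fuel acc h
    cases fuel with
    | zero => simp at h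
    | succ f =>
      by_cases hc : c = 'M'
      · subst hc
        rw [show PySem.Chars.replace.go ['M'] ['m'] (f+1) ('M'::t) acc
            = PySem.Chars.replace.go ['M'] ['m'] f t ('m' :: acc) from by
          simp [PySem.Chars.replace.go, List.isPrefixOf]]
        rw [ih f ('m' :: acc) (by simpa using Nat.lt_succ_iff.mp (by simpa using h))]
        simp [pvR]
      · rw [show PySem.Chars.replace.go ['M'] ['m'] (f+1) (c::t) acc
            = PySem.Chars.replace.go ['M'] ['m'] f t (c :: acc) from by
          simp [PySem.Chars.replace.go, List.isPrefixOf, Ne.symm hc]]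
        rw [ih f (c :: acc) (by simpa using Nat.lt_succ_iff.mp (by simpa using h))]
        simp [pvR, hc]

lemma pv_replace_Mm (cs : List Char) :
    PySem.Chars.replace cs ['M'] ['m'] = cs.map pvR := by
  rw [show PySem.Chars.replace cs ['M'] ['m']
      = PySem.Chars.replace.go ['M'] ['m'] cs.length cs [] from by
    simp [PySem.Chars.replace]]
  rw [pv_goRepl cs cs.length [] (le_refl _)]
  simp

lemma pv_goFind : ∀ (cs : List Char) (k : Nat),
    PySem.Chars.find.go ['o'] cs k
      = if 'o' ∈ cs then ((k + cs.idxOf 'o' : Nat) : Int) else -1 := by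
  intro cs
  induction cs with
  | nil =>
    intro k
    simp [PySem.Chars.find.go]
  | cons c t ih =>
    intro k
    by_cases hc : c = 'o'
    · subst hc
      simp [PySem.Chars.find.go, List.isPrefixOf, List.idxOf_cons_self]
    · rw [show PySem.Chars.find.go ['o'] (c::t) k
          = PySem.Chars.find.go ['o'] t (k+1) from by
        simp [PySem.Chars.find.go, List.isPrefixOf, Ne.symm hc]]
      rw [ih (k+1)]
      by_cases hm : 'o' ∈ t
      · simp [hm, List.idxOf_cons_ne t hc]
        ring
      · simp [hm, Ne.symm hc]

lemma pv_find_o (cs : List Char) :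
    PySem.Chars.find cs ['o'] = if 'o' ∈ cs then ((cs.idxOf 'o' : Nat) : Int) else -1 := by
  rw [show PySem.Chars.find cs ['o'] = PySem.Chars.find.go ['o'] cs 0 from rfl]
  rw [pv_goFind cs 0]
  simp

lemma pv_fixS_no_o (cs : List Char) (h : 'o' ∉ cs) : pvFixS cs = cs := by
  induction cs with
  | nil => rfl
  | cons c t ih =>
    simp only [List.mem_cons, not_or] at h
    have hc : c ≠ 'o' := fun e => h.1 e.symm
    simp [pvFixS, hc, ih h.2]

lemma pv_fixS_take_drop : ∀ (cs : List Char), 'o' ∈ cs →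
    cs.take (cs.idxOf 'o') ++ (cs.drop (cs.idxOf 'o')).map pvR = pvFixS cs := by
  intro cs
  induction cs with
  | nil => intro h; simp at h
  | cons c t ih =>
    intro h
    by_cases hc : c = 'o'
    · subst hc
      simp [List.idxOf_cons_self, pvFixS, pvR]
    · have hm : 'o' ∈ t := by
        rcases List.mem_cons.mp h with h1 | h1
        · exact absurd h1.symm hc
        · exact h1
      rw [List.idxOf_cons_ne t hc]
      simp only [List.take_succ_cons, List.drop_succ_cons, List.cons_append]
      rw [ih hm]
      simp [pvFixS, hc]

lemma pv_fix_toList (p : String) : (pvFix p).toList = pvFixS p.toList := by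
  unfold pvFix
  by_cases h : 'o' ∈ p.toList
  · have hf : PySem.Str.find p "o" = ((p.toList.idxOf 'o' : Nat) : Int) := by
      rw [PySem.Str.find_eq, show ("o" : String).toList = ['o'] from rfl, pv_find_o]
      simp [h]
    rw [hf, if_neg (by simp)]
    rw [String.toList_append, PySem.Str.toList_slice, PySem.Str.toList_replace,
      PySem.Str.toList_slice]
    simp only [PySem.Chars.slice_eq_listSlice]
    rw [show ("M" : String).toList = ['M'] from rfl, show ("m" : String).toList = ['m'] from rfl]
    rw [PySem.List.slice_to_natCast, PySem.List.slice_from_natCast, pv_replace_Mm]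
    exact pv_fixS_take_drop p.toList h
  · have hf : PySem.Str.find p "o" = -1 := by
      rw [PySem.Str.find_eq, show ("o" : String).toList = ['o'] from rfl, pv_find_o]
      simp [h]
    rw [hf, if_pos (by norm_num), pv_fixS_no_o p.toList h]

lemma pv_mach02 : ∀ (cs : List Char), pvMach 0 cs = pvMach 2 cs := by
  intro cs
  induction cs with
  | nil => rfl
  | cons c t ih =>
    by_cases ho : c = 'o' <;> by_cases hi : c = 'i' <;>
      simp [pvMach, ho, hi, ih]

lemma pv_join_cons_head (c : Char) (p : List Char) (ps : List (List Char)) :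
    PySem.Chars.join ['i'] ((c :: p) :: ps) = c :: PySem.Chars.join ['i'] (p :: ps) := by
  cases ps with
  | nil => simp [PySem.Chars.join_singleton]
  | cons q qs =>
    rw [PySem.Chars.join_cons_cons, PySem.Chars.join_cons_cons]
    simp

lemma pv_glue : ∀ (cs : List Char),
    PySem.Chars.join ['i'] (((pvMsp cs).1 :: (pvMsp cs).2).map pvFixS) = pvMach 0 cs ∧
    PySem.Chars.join ['i'] (((pvMsp cs).1.map pvR :: ((pvMsp cs).2).map pvFixS)) = pvMach 1 cs := by
  intro cs
  induction cs with
  | nil =>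
    constructor <;> simp [pvMsp, pvFixS, pvMach, PySem.Chars.join_singleton]
  | cons c t ih =>
    obtain ⟨ih1, ih2⟩ := ih
    simp only [List.map_cons] at ih1
    by_cases hi : c = 'i'
    · subst hi
      have hmsp : pvMsp ('i' :: t) = ([], (pvMsp t).1 :: (pvMsp t).2) := by simp [pvMsp]
      constructor
      · rw [hmsp]
        simp only [List.map_cons]
        rw [show pvFixS [] = ([] : List Char) from rfl, PySem.Chars.join_cons_cons]
        simp only [List.nil_append, List.singleton_append]
        rw [ih1]
        simp [pvMach, pv_mach02]
      · rw [hmsp]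
        simp only [List.map_nil, List.map_cons]
        rw [PySem.Chars.join_cons_cons]
        simp only [List.nil_append, List.singleton_append]
        rw [ih1]
        simp [pvMach, pv_mach02]
    · have hmsp : pvMsp (c :: t) = (c :: (pvMsp t).1, (pvMsp t).2) := by simp [pvMsp, hi]
      by_cases ho : c = 'o'
      · subst ho
        constructor
        · rw [hmsp]
          simp only [List.map_cons]
          rw [show pvFixS ('o' :: (pvMsp t).1) = 'o' :: List.map pvR (pvMsp t).1 from by
            simp [pvFixS], pv_join_cons_head, ih2]
          simp [pvMach]
        · rw [hmsp]
          simp only [List.map_cons]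
          rw [show pvR 'o' = 'o' from rfl, pv_join_cons_head, ih2]
          simp [pvMach]
      · constructor
        · rw [hmsp]
          simp only [List.map_cons]
          rw [show pvFixS (c :: (pvMsp t).1) = c :: pvFixS (pvMsp t).1 from by
            simp [pvFixS, ho], pv_join_cons_head, ih1]
          simp [pvMach, ho, hi]
        · rw [hmsp]
          simp only [List.map_cons]
          rw [pv_join_cons_head, ih2]
          simp [pvMach, pvR, ho, hi]
lemma pv_B_elem (s : String) :
    PySem.Str.join "i" (((PySem.Str.split? s "i").getD []).map pvFix)
      = String.ofList (pvMach 0 s.toList) := by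
  have hsm := PySem.Str.split?_map s "i"
  cases hps : PySem.Str.split? s "i" with
  | none =>
    rw [hps] at hsm
    simp [PySem.Chars.split?, show ("i" : String).toList = ['i'] from rfl] at hsm
  | some ps =>
    rw [hps] at hsm
    simp only [Option.map_some, show ("i" : String).toList = ['i'] from rfl,
      PySem.Chars.split?] at hsm
    simp only [List.isEmpty_cons, Bool.false_eq_true, if_false, Option.some.injEq] at hsm
    simp only [Option.getD_some]
    apply String.toList_inj.mp
    rw [PySem.Str.toList_join, show ("i" : String).toList = ['i'] from rfl, List.map_map]
    rw [show (String.toList ∘ pvFix) = (fun p => pvFixS p.toList) from funext fun p => pv_fix_toList p]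
    rw [show List.map (fun p => pvFixS p.toList) ps
        = List.map pvFixS (List.map String.toList ps) from by rw [List.map_map]; rfl]
    rw [hsm, pv_splitOn_i, (pv_glue s.toList).1]
    simp

-- ===== VERDICT (by name: the statement is the Claim_ definition above) =====
theorem TMRelabel_spec : Claim_equal_TMRelabel := by
  intro lbl _
  unfold Spec_TMRelabel TMRelabel_alt
  rw [pv_A_eq_map]
  exact List.map_congr_left (fun s _ => (pv_B_elem s).symm)
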